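-- pv_equiv track=rewrite | github.com/opjoobe/python_algorithm | Programmers/문자열 정렬하기(2).py | solution
-- ===== SOURCE A (Python) =====
-- from collections import defaultdict
--
-- def solution(my_string):
--     alpha_dict = defaultdict(int)
--     for letter in my_string:
--         alpha_dict[letter.lower()] += 1
--     answer = ''
--     for num in range(97, 123):
--         letter = chr(num)
--         answer += letter * alpha_dict[letter]
--     return answer
-- ===== SOURCE B (Python) =====
-- def solution(my_string):
--     return ''.join(sorted(ch for ch in my_string.lower() if 'a' <= ch <= 'z'))
-- ===== Notes on version B (the rewrite author's own statement) =====
-- stated objective: idiomatic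
-- what changed: Replaces A's defaultdict frequency table plus emit-by-index counting sort over the 26-letter range with a one-liner that lowercases, filters to a-z, comparison-sorts the letters and joins them.
import Mathlib
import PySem

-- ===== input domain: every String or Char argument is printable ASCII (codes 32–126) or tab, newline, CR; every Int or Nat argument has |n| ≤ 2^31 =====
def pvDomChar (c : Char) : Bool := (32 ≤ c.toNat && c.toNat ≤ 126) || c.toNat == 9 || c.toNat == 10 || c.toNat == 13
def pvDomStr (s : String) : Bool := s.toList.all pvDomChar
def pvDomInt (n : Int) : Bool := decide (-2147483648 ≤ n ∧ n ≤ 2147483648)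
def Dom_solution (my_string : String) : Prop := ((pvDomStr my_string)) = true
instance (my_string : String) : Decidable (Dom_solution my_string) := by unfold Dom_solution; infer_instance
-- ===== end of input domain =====

-- B replaces A's 26-slot frequency-table counting sort with the idiomatic
-- lowercase → filter 'a'..'z' → comparison-sort → join one-liner; same return value.

-- ===== PORT A =====
-- Python's string accumulation is modelled as a List Char, turned into a String once at the end.
def solution (my_string : String) : String :=
  let alpha_dict : PySem.Dict Char Int :=
    my_string.toList.foldl (fun d letter => d.modify (PySem.Chars.lowerChar letter) 0 (· + 1)) PySem.Dict.empty
  let answer : List Char :=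
    (PySem.List.pyRange 97 123 1).foldl (fun answer num =>
      let letter : Char := Char.ofNat num.toNat
      answer ++ PySem.List.pyRepeat [letter] (alpha_dict.getD letter 0)) []
  String.ofList answer

-- ===== PORT B =====
def solution_alt (my_string : String) : String :=
  String.ofList (PySem.List.sorted
    ((PySem.Str.lower my_string).toList.filter (fun ch => 'a' ≤ ch && ch ≤ 'z'))
    (fun x => x) false)

-- ===== PRECONDITION & SPEC =====
def Spec_solution (my_string : String) (out : String) : Prop := out = solution_alt my_string
instance (my_string : String) (out : String) : Decidable (Spec_solution my_string out) := by unfold Spec_solution; infer_instance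

-- ===== CLAIM (what is proved, stated in full; the proofs are below) =====
def Claim_equal_solution : Prop := ∀ (my_string : String), Dom_solution my_string → Spec_solution my_string (solution my_string)

-- ===== LEMMAS AND PROOFS =====

-- what A's emission loop produces, as a flatMap of replicates
def pvEmit (l : List Char) (a b : Int) : List Char :=
  (PySem.List.pyRange a b 1).flatMap (fun n => List.replicate (l.count (Char.ofNat n.toNat)) (Char.ofNat n.toNat))

theorem pv_char_toNat_ofNat {n : Nat} (h : n < 55296) : (Char.ofNat n).toNat = n := by
  rw [Char.toNat_ofNat]
  have hv : n.isValidChar := Or.inl h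
  simp [hv]

theorem pv_char_le_iff (c d : Char) : c ≤ d ↔ c.toNat ≤ d.toNat := by
  rw [Char.le_def, UInt32.le_iff_toNat_le]
  exact Iff.rfl

theorem pv_pred_iff (c : Char) :
    ((decide ('a' ≤ c) && decide (c ≤ 'z')) = true) ↔ (97 ≤ c.toNat ∧ c.toNat ≤ 122) := by
  rw [Bool.and_eq_true, decide_eq_true_iff, decide_eq_true_iff, pv_char_le_iff, pv_char_le_iff]
  have h1 : ('a').toNat = 97 := rfl
  have h2 : ('z').toNat = 122 := rfl
  rw [h1, h2]

theorem pv_count_emit (l : List Char) (x : Char) (b : Int) (hb : b ≤ 1000) :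
    ∀ (k : Nat) (a : Int), 0 ≤ a → b ≤ a + k →
      (pvEmit l a b).count x
        = if a ≤ (x.toNat : Int) ∧ (x.toNat : Int) < b then l.count x else 0 := by
  intro k
  induction k with
  | zero =>
    intro a ha hk
    rw [pvEmit, PySem.List.pyRange_one_eq_nil (by omega), if_neg (by omega)]
    simp
  | succ k ih =>
    intro a ha hk
    by_cases h : b ≤ a
    · rw [pvEmit, PySem.List.pyRange_one_eq_nil h, if_neg (by omega)]
      simp
    · push Not at h
      rw [pvEmit, PySem.List.pyRange_one_cons h]
      simp only [List.flatMap_cons, List.count_append]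
      have hrest := ih (a + 1) (by omega) (by omega)
      rw [pvEmit] at hrest
      rw [hrest, List.count_replicate]
      by_cases hx : (x.toNat : Int) = a
      · have hxa : Char.ofNat a.toNat = x := by
          have hnn : a.toNat = x.toNat := by omega
          rw [hnn, Char.ofNat_toNat]
        rw [hxa]
        simp only [beq_self_eq_true, if_true]
        split_ifs <;> omega
      · have hne : (Char.ofNat a.toNat == x) = false := by
          apply beq_eq_false_iff_ne.mpr
          intro he
          apply hx
          have : x.toNat = (Char.ofNat a.toNat).toNat := by rw [he]
          rw [pv_char_toNat_ofNat (by omega)] at this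
          omega
        rw [hne]
        simp only [Bool.false_eq_true, if_false]
        split_ifs <;> omega

theorem pv_pairwise_emit (l : List Char) (b : Int) (hb : b ≤ 1000) :
    ∀ (k : Nat) (a : Int), 0 ≤ a → b ≤ a + k → (pvEmit l a b).Pairwise (· ≤ ·) := by
  intro k
  induction k with
  | zero =>
    intro a ha hk
    rw [pvEmit, PySem.List.pyRange_one_eq_nil (by omega)]
    simp
  | succ k ih =>
    intro a ha hk
    by_cases h : b ≤ a
    · rw [pvEmit, PySem.List.pyRange_one_eq_nil h]; simp
    · push Not at h
      rw [pvEmit, PySem.List.pyRange_one_cons h]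
      simp only [List.flatMap_cons]
      rw [List.pairwise_append]
      refine ⟨List.pairwise_replicate.mpr (Or.inr le_rfl), ?_, ?_⟩
      · have := ih (a + 1) (by omega) (by omega)
        rw [pvEmit] at this
        exact this
      · intro u hu v hv
        have hu' : u = Char.ofNat a.toNat := List.eq_of_mem_replicate hu
        rcases List.mem_flatMap.mp hv with ⟨m, hm, hv'⟩
        have hv'' : v = Char.ofNat m.toNat := List.eq_of_mem_replicate hv'
        have hmr := (PySem.List.mem_pyRange_one).mp hm
        rw [hu', hv'', pv_char_le_iff,
          pv_char_toNat_ofNat (n := a.toNat) (by omega),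
          pv_char_toNat_ofNat (n := m.toNat) (by omega)]
        omega

theorem pv_emit_perm_filter (l : List Char) :
    (pvEmit l 97 123).Perm (l.filter (fun ch => 'a' ≤ ch && ch ≤ 'z')) := by
  rw [List.perm_iff_count]
  intro x
  rw [pv_count_emit l x 123 (by omega) 26 97 (by omega) (by omega)]
  by_cases hp : (decide ('a' ≤ x) && decide (x ≤ 'z')) = true
  · have hx := (pv_pred_iff x).mp hp
    rw [if_pos (by omega)]
    exact (List.count_filter (p := fun ch => decide ('a' ≤ ch) && decide (ch ≤ 'z')) hp).symm
  · have hx : ¬ (97 ≤ x.toNat ∧ x.toNat ≤ 122) := fun hc => hp ((pv_pred_iff x).mpr hc)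
    rw [if_neg (by omega)]
    symm
    rw [List.count_eq_zero]
    intro hmem
    exact hp (List.of_mem_filter (p := fun ch => decide ('a' ≤ ch) && decide (ch ≤ 'z')) hmem)

theorem pv_lower_eq_map (l : List Char) : PySem.Chars.lower l = l.map PySem.Chars.lowerChar := rfl

theorem pv_loopA (D : PySem.Dict Char Int) (r : List Int) (acc : List Char) :
    r.foldl (fun answer num => answer ++ PySem.List.pyRepeat [Char.ofNat num.toNat] (D.getD (Char.ofNat num.toNat) 0)) acc
      = acc ++ r.flatMap (fun num => List.replicate (D.getD (Char.ofNat num.toNat) 0).toNat (Char.ofNat num.toNat)) := by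
  induction r generalizing acc with
  | nil => simp
  | cons n t ih =>
    rw [List.foldl_cons, ih, List.flatMap_cons, PySem.List.pyRepeat_singleton, List.append_assoc]

-- ===== VERDICT (by name: the statement is the Claim_ definition above) =====
theorem solution_spec : Claim_equal_solution := by
  intro s _
  show String.ofList
      ((PySem.List.pyRange 97 123 1).foldl
        (fun answer num =>
          answer ++ PySem.List.pyRepeat [Char.ofNat num.toNat]
            ((s.toList.foldl (fun d letter => PySem.Dict.modify d (PySem.Chars.lowerChar letter) 0 (· + 1))
                PySem.Dict.empty).getD (Char.ofNat num.toNat) 0))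
        [])
    = String.ofList (PySem.List.sorted
        ((PySem.Str.lower s).toList.filter (fun ch => 'a' ≤ ch && ch ≤ 'z'))
        (fun x => x) false)
  have hd : (s.toList.foldl (fun d letter => PySem.Dict.modify d (PySem.Chars.lowerChar letter) 0 (· + 1)) PySem.Dict.empty)
      = PySem.Dict.counter (s.toList.map PySem.Chars.lowerChar) := by
    rw [PySem.Dict.counter_eq_foldl, List.foldl_map]
  rw [hd, pv_loopA]
  simp only [PySem.Dict.getD_counter, Int.toNat_natCast, List.nil_append]
  rw [PySem.Str.toList_lower, pv_lower_eq_map]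
  refine congrArg String.ofList ?_
  exact (PySem.List.sorted_id_eq_of_perm_of_pairwise _ _
    (pv_emit_perm_filter (s.toList.map PySem.Chars.lowerChar))
    (pv_pairwise_emit (s.toList.map PySem.Chars.lowerChar) 123 (by omega) 26 97 (by omega) (by omega))).symm
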